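-- pv_equiv track=rewrite | github.com/Sukhdevkaushik/PythonCode | course/hash/find_same_item_in_2_list.py | validate_emp_id
-- ===== SOURCE A (Python) =====
-- def validate_emp_id(emp_ids):
--     data = []
--     uppercase = 0
--     digits = 0
--     for emp_id in emp_ids:
--         for char in emp_id:
--             if char.isdigit():
--                 digits += 1
--             if char.isupper():
--                 uppercase += 1
--
--             if char in data:
--                 return "Invalid"
--             data.append(char)
--         if digits < 3 or uppercase < 2:
--             return "Invalid"
--         else:
--             return "Valid"
-- ===== SOURCE B (Python) =====
-- def validate_emp_id(emp_ids):
--     for emp_id in emp_ids: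
--         counts = {}
--         for c in emp_id:
--             counts[c] = counts.get(c, 0) + 1
--         if any(counts[c] > 1 for c in counts):
--             return "Invalid"
--         digits = sum(1 for c in counts if c.isdigit())
--         uppercase = sum(1 for c in counts if c.isupper())
--         return "Valid" if digits >= 3 and uppercase >= 2 else "Invalid"
--     return None
-- ===== Notes on version B (the rewrite author's own statement) =====
-- stated objective: alternative
-- what changed: Replaces A's interleaved scan with its O(n^2) 'char in data' list membership by a single counting-dict pass: duplicates are detected from the counts and the digit/uppercase tallies are taken over the dict's keys, removing the inner list scan entirely.
import Mathlib
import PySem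

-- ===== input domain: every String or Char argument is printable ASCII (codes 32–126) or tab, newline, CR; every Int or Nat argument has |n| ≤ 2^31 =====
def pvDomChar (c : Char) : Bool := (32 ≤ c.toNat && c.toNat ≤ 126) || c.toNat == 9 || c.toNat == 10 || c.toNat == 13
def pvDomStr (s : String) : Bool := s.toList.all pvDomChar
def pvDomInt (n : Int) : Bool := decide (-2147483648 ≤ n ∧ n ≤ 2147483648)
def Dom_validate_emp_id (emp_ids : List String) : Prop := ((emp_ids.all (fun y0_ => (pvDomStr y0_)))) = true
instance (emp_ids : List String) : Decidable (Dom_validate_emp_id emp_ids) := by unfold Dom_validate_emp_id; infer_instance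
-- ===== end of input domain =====

-- B replaces A's interleaved scan (with its inner 'char in data' list-membership scan) by one
-- counting-dict pass from which duplicate detection and the digit/uppercase tallies are derived.


-- ===== PORT A =====
-- A's inner 'for char in emp_id' loop; state (data, digits, uppercase); none = the early 'return "Invalid"'.
def pvInnerA : List Char → List Char → Int → Int → Option (Int × Int)
  | [], _, digits, uppercase => some (digits, uppercase)
  | c :: rest, data, digits, uppercase =>
    let digits := if PySem.Chars.isdigit c then digits + 1 else digits
    let uppercase := if PySem.Chars.isupper c then uppercase + 1 else uppercase
    if c ∈ data then none
    else pvInnerA rest (data ++ [c]) digits uppercase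

-- A's outer 'for emp_id in emp_ids' returns unconditionally in its first iteration,
-- so it is the match on the head; [] falls through to Python's implicit 'return None'.
def validate_emp_id (emp_ids : List String) : Option String :=
  match emp_ids with
  | [] => none
  | emp_id :: _ =>
    match pvInnerA emp_id.toList [] 0 0 with
    | none => some "Invalid"
    | some (digits, uppercase) =>
      if digits < 3 ∨ uppercase < 2 then some "Invalid" else some "Valid"

-- ===== PORT B =====
def validate_emp_id_alt (emp_ids : List String) : Option String :=
  match emp_ids with
  | [] => none
  | emp_id :: _ =>
    let counts : PySem.Dict Char Int :=
      emp_id.toList.foldl (fun d c => d.insert c (d.getD c 0 + 1)) PySem.Dict.empty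
    if (PySem.Dict.keys counts).any (fun c => decide (counts.getD c 0 > 1)) then some "Invalid"
    else
      let digits : Int := ((PySem.Dict.keys counts).countP (fun c => PySem.Chars.isdigit c) : Int)
      let uppercase : Int := ((PySem.Dict.keys counts).countP (fun c => PySem.Chars.isupper c) : Int)
      if digits ≥ 3 ∧ uppercase ≥ 2 then some "Valid" else some "Invalid"

-- ===== PRECONDITION & SPEC =====
def Spec_validate_emp_id (emp_ids : List String) (out : Option String) : Prop := out = validate_emp_id_alt emp_ids
instance (emp_ids : List String) (out : Option String) : Decidable (Spec_validate_emp_id emp_ids out) := by unfold Spec_validate_emp_id; infer_instance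

-- ===== CLAIM (what is proved, stated in full; the proofs are below) =====
def Claim_equal_validate_emp_id : Prop := ∀ (emp_ids : List String), Dom_validate_emp_id emp_ids → Spec_validate_emp_id emp_ids (validate_emp_id emp_ids)

-- ===== LEMMAS AND PROOFS =====
lemma pvInnerA_eq (cs : List Char) : ∀ (data : List Char) (d u : Int),
    pvInnerA cs data d u =
      if cs.Nodup ∧ ∀ c ∈ cs, c ∉ data then
        some (d + cs.countP (fun c => PySem.Chars.isdigit c),
              u + cs.countP (fun c => PySem.Chars.isupper c))
      else none := by
  induction cs with
  | nil => intro data d u; simp [pvInnerA]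
  | cons c rest ih =>
    intro data d u
    by_cases hc : c ∈ data
    · simp [pvInnerA, hc]
    · have hstep : pvInnerA (c :: rest) data d u
        = pvInnerA rest (data ++ [c])
            (if PySem.Chars.isdigit c then d + 1 else d)
            (if PySem.Chars.isupper c then u + 1 else u) := by
        simp [pvInnerA, hc]
      have hcond : (rest.Nodup ∧ ∀ x ∈ rest, x ∉ data ++ [c])
          ↔ ((c :: rest).Nodup ∧ ∀ x ∈ c :: rest, x ∉ data) := by
        constructor
        · rintro ⟨hn, h⟩
          have hcr : c ∉ rest := fun hmem =>
            (h c hmem) (List.mem_append.mpr (Or.inr (List.mem_singleton.mpr rfl)))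
          refine ⟨List.nodup_cons.mpr ⟨hcr, hn⟩, ?_⟩
          intro x hx
          rcases List.mem_cons.mp hx with rfl | hx
          · exact hc
          · exact fun hd => (h x hx) (List.mem_append.mpr (Or.inl hd))
        · rintro ⟨hn, h⟩
          rcases List.nodup_cons.mp hn with ⟨hcr, hn'⟩
          refine ⟨hn', fun x hx hd => ?_⟩
          rcases List.mem_append.mp hd with hd | hd
          · exact (h x (List.mem_cons.mpr (Or.inr hx))) hd
          · rw [List.mem_singleton.mp hd] at hx; exact hcr hx
      rw [hstep, ih, if_congr hcond rfl rfl]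
      by_cases hP : (c :: rest).Nodup ∧ ∀ x ∈ c :: rest, x ∉ data
      · simp only [if_pos hP, Option.some.injEq, Prod.mk.injEq, List.countP_cons]
        constructor <;> (push_cast; split_ifs <;> omega)
      · rw [if_neg hP, if_neg hP]

-- the counting dict has a value > 1 iff the string has a duplicate char
lemma pvAny_dup (cs : List Char) :
    ((PySem.Set.ofList cs).any fun c => decide ((PySem.Dict.counter cs).getD c 0 > 1)) = !decide cs.Nodup := by
  by_cases h : cs.Nodup
  · simp only [h, decide_true, Bool.not_true, List.any_eq_false]
    intro c hcmem
    simp only [PySem.Dict.getD_counter, decide_eq_true_eq, not_lt]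
    exact_mod_cast List.nodup_iff_count_le_one.mp h c
  · simp only [h, decide_false, Bool.not_false, List.any_eq_true]
    rw [List.nodup_iff_count_le_one] at h
    push Not at h
    obtain ⟨c, hcnt⟩ := h
    refine ⟨c, ?_, ?_⟩
    · exact (PySem.Set.mem_ofList cs c).mpr (List.count_pos_iff.mp (by omega))
    · simp only [PySem.Dict.getD_counter, decide_eq_true_eq]
      exact_mod_cast hcnt

-- ===== VERDICT (by name: the statement is the Claim_ definition above) =====
theorem validate_emp_id_spec : Claim_equal_validate_emp_id := by
  intro emp_ids _
  unfold Spec_validate_emp_id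
  cases emp_ids with
  | nil => rfl
  | cons s tl =>
    have hB : validate_emp_id_alt (s :: tl)
        = if ((PySem.Set.ofList s.toList).any fun c =>
              decide ((PySem.Dict.counter s.toList).getD c 0 > 1)) then some "Invalid"
          else if ((List.countP (fun c => PySem.Chars.isdigit c) (PySem.Set.ofList s.toList) : Int) ≥ 3
                  ∧ ((List.countP (fun c => PySem.Chars.isupper c) (PySem.Set.ofList s.toList) : Int)) ≥ 2)
               then some "Valid" else some "Invalid" := by
      simp only [validate_emp_id_alt, PySem.Dict.foldl_insert_getD_add_one_eq_counter,
        PySem.Dict.keys_counter]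
      rfl
    rw [hB, pvAny_dup]
    have hA : validate_emp_id (s :: tl)
        = if s.toList.Nodup then
            (if ((List.countP (fun c => PySem.Chars.isdigit c) s.toList : Int) < 3
                ∨ ((List.countP (fun c => PySem.Chars.isupper c) s.toList : Int)) < 2)
             then some "Invalid" else some "Valid")
          else some "Invalid" := by
      simp only [validate_emp_id, pvInnerA_eq, List.not_mem_nil, not_false_iff, implies_true,
        and_true, zero_add]
      split_ifs <;> simp_all
    rw [hA]
    by_cases h : s.toList.Nodup
    · rw [if_pos h, PySem.Set.ofList_eq_self_of_nodup s.toList h]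
      simp only [h, decide_true, Bool.not_true, Bool.false_eq_true, if_false]
      split_ifs with h1 h2 h2 <;> first | rfl | omega
    · rw [if_neg h]
      simp only [h, decide_false, Bool.not_false, if_true]
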